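-- pv_equiv track=rewrite | github.com/pypi-data/pypi-mirror-366 | packages/kailash-dataflow/kailash_dataflow-0.3.3.tar.gz/kailash_dataflow-0.3.3/src/dataflow/nodes/smart_operations.py | _enrich_merge
-- ===== SOURCE A (Python) =====
-- from typing import Any, Dict, List, Optional
--
-- def _enrich_merge(
--
--     left_data: List[Dict],
--     right_data: List[Dict],
--     join_conditions: Dict[str, str],
--     enrich_fields: List[str],
-- ) -> List[Dict]:
--     """Perform enrich merge - add specific fields from right to left."""
--     left_key = join_conditions.get("left_key")
--     right_key = join_conditions.get("right_key")
--
--     if not left_key or not right_key: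
--         return left_data.copy()
--
--     # Create index for right data
--     right_index = {}
--     for right_record in right_data:
--         key_value = right_record.get(right_key)
--         if key_value is not None:
--             right_index[key_value] = right_record
--
--     # Perform enrichment
--     result = []
--     for left_record in left_data:
--         enriched_record = left_record.copy()
--         left_value = left_record.get(left_key)
--
--         if left_value is not None and left_value in right_index:
--             right_record = right_index[left_value]
--
--             # Add all fields if no specific fields specified
--             if not enrich_fields:
--                 for key, value in right_record.items():
--                     if key != right_key:  # Don't duplicate the join key
--                         enriched_record[f"right_{key}"] = value
--             else:
--                 # Add only specified fields
--                 for field in enrich_fields: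
--                     if field in right_record:
--                         enriched_record[field] = right_record[field]
--
--         result.append(enriched_record)
--
--     return result
-- ===== SOURCE B (Python) =====
-- def _enrich_merge(left_data, right_data, join_conditions, enrich_fields):
--     """Enrich merge without building an index: per left record, scan right_data
--     from the end for the match (last duplicate wins, like dict overwrite)."""
--     left_key = join_conditions.get("left_key")
--     right_key = join_conditions.get("right_key")
--     if not left_key or not right_key:
--         return left_data.copy()
--
--     def match_for(left_value):
--         for right_record in reversed(right_data):
--             if right_record.get(right_key) == left_value:
--                 return right_record
--         return None
--
--     def enriched(left_record):
--         out = left_record.copy()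
--         left_value = left_record.get(left_key)
--         if left_value is None:
--             return out
--         right_record = match_for(left_value)
--         if right_record is None:
--             return out
--         if enrich_fields:
--             out.update({f: right_record[f] for f in enrich_fields if f in right_record})
--         else:
--             out.update({f"right_{k}": v for k, v in right_record.items() if k != right_key})
--         return out
--
--     return [enriched(left_record) for left_record in left_data]
-- ===== Notes on version B (the rewrite author's own statement) =====
-- stated objective: alternative
-- what changed: Replaces the precomputed right-key index dict and accumulator loop with a direct per-record reversed linear search for the (last-wins) matching right record, and applies the enrichment via dict-comprehension updates inside a list comprehension.
import Mathlib
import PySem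

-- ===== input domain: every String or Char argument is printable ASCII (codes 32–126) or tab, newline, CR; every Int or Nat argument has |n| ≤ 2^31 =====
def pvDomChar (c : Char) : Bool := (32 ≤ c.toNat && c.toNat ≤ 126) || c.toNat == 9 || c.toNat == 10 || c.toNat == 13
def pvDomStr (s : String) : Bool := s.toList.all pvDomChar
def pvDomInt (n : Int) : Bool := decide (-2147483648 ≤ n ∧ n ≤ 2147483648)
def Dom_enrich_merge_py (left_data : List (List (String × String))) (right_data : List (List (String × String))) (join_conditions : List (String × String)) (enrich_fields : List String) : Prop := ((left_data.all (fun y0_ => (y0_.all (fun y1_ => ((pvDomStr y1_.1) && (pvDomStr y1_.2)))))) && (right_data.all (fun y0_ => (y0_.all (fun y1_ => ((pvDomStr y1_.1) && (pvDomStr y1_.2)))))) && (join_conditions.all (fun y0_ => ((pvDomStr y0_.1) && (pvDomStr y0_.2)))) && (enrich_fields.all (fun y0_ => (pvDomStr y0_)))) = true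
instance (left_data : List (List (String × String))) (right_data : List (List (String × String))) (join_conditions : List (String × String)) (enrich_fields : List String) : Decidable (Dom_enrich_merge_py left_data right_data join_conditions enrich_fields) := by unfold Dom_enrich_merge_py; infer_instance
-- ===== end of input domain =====

-- B replaces A's precomputed right-key index with a per-left-record reversed linear scan
-- (alternative decomposition, not faster); return-value equivalence only (A returns fresh lists).


-- ===== PORT A =====
def enrich_merge_py (left_data : List (List (String × String))) (right_data : List (List (String × String))) (join_conditions : List (String × String)) (enrich_fields : List String) : List (List (String × String)) :=
  match (PySem.Dict.mk join_conditions).get? "left_key", (PySem.Dict.mk join_conditions).get? "right_key" with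
  | some left_key, some right_key =>
    if left_key = "" ∨ right_key = "" then left_data
    else
      -- Create index for right data
      let right_index : PySem.Dict String (List (String × String)) :=
        right_data.foldl (fun idx right_record =>
          match (PySem.Dict.mk right_record).get? right_key with
          | some key_value => idx.insert key_value right_record
          | none => idx) PySem.Dict.empty
      -- Perform enrichment
      let result := left_data.foldl (fun res left_record =>
        let enriched_record := PySem.Dict.mk left_record
        let enriched_record :=
          match (PySem.Dict.mk left_record).get? left_key with
          | some left_value =>
            match right_index.get? left_value with
            | some right_record =>
              if enrich_fields = [] then
                (PySem.Dict.mk right_record).items.foldl (fun (e : PySem.Dict String String) (kv : String × String) =>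
                  if kv.1 ≠ right_key then e.insert ("right_" ++ kv.1) kv.2 else e) enriched_record
              else
                enrich_fields.foldl (fun (e : PySem.Dict String String) (field : String) =>
                  match (PySem.Dict.mk right_record).get? field with
                  | some v => e.insert field v
                  | none => e) enriched_record
            | none => enriched_record
          | none => enriched_record
        res ++ [enriched_record.items]) []
      result
  | _, _ => left_data

-- ===== PORT B =====
-- scan right_data from the end for the first (i.e. overall last) matching record
def pvMatchFor (right_key : String) (right_data : List (List (String × String))) (left_value : String) : Option (List (String × String)) :=
  right_data.reverse.find? (fun right_record => (PySem.Dict.mk right_record).get? right_key == some left_value)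

def pvEnriched (left_key right_key : String) (right_data : List (List (String × String))) (enrich_fields : List String) (left_record : List (String × String)) : List (String × String) :=
  let out := PySem.Dict.mk left_record
  (((PySem.Dict.mk left_record).get? left_key).bind (pvMatchFor right_key right_data)).elim
    out.items
    (fun right_record =>
      if enrich_fields ≠ [] then
        (out.update (enrich_fields.filterMap (fun f => ((PySem.Dict.mk right_record).get? f).map (fun v => (f, v))))).items
      else
        (out.update (((PySem.Dict.mk right_record).items.filter (fun kv => kv.1 ≠ right_key)).map (fun kv => ("right_" ++ kv.1, kv.2)))).items)

def enrich_merge_py_alt (left_data : List (List (String × String))) (right_data : List (List (String × String))) (join_conditions : List (String × String)) (enrich_fields : List String) : List (List (String × String)) :=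
  let left_key := ((PySem.Dict.mk join_conditions).get? "left_key").getD ""
  let right_key := ((PySem.Dict.mk join_conditions).get? "right_key").getD ""
  if left_key = "" ∨ right_key = "" then left_data
  else left_data.map (pvEnriched left_key right_key right_data enrich_fields)

-- ===== PRECONDITION & SPEC =====
def Spec_enrich_merge_py (left_data : List (List (String × String))) (right_data : List (List (String × String))) (join_conditions : List (String × String)) (enrich_fields : List String) (out : List (List (String × String))) : Prop := out = enrich_merge_py_alt left_data right_data join_conditions enrich_fields
instance (left_data : List (List (String × String))) (right_data : List (List (String × String))) (join_conditions : List (String × String)) (enrich_fields : List String) (out : List (List (String × String))) : Decidable (Spec_enrich_merge_py left_data right_data join_conditions enrich_fields out) := by unfold Spec_enrich_merge_py; infer_instance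

-- ===== CLAIM (what is proved, stated in full; the proofs are below) =====
def Claim_equal_enrich_merge_py : Prop := ∀ (left_data : List (List (String × String))) (right_data : List (List (String × String))) (join_conditions : List (String × String)) (enrich_fields : List String), Dom_enrich_merge_py left_data right_data join_conditions enrich_fields → Spec_enrich_merge_py left_data right_data join_conditions enrich_fields (enrich_merge_py left_data right_data join_conditions enrich_fields)

-- ===== LEMMAS AND PROOFS =====

-- A's index lookup is B's reversed-scan find (last duplicate wins)
theorem pv_index_lookup (right_key : String) (rs : List (List (String × String))) (d : PySem.Dict String (List (String × String))) (lv : String) :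
    (rs.foldl (fun idx r =>
      match (PySem.Dict.mk r).get? right_key with
      | some kv => idx.insert kv r
      | none => idx) d).get? lv
    = ((rs.reverse.find? (fun r => (PySem.Dict.mk r).get? right_key == some lv)).or (d.get? lv)) := by
  induction rs generalizing d with
  | nil => simp
  | cons r rs ih =>
    simp only [List.foldl_cons, List.reverse_cons, List.find?_append, ih]
    cases hf : rs.reverse.find? (fun r => (PySem.Dict.mk r).get? right_key == some lv) with
    | some x => simp
    | none =>
      simp only [Option.none_or]
      cases hk : (PySem.Dict.mk r).get? right_key with
      | none => simp [List.find?, hk]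
      | some kv =>
        simp only [List.find?, hk]
        rw [PySem.Dict.get?_insert]
        by_cases h : lv = kv
        · simp [h]
        · have hkl : (kv == lv) = false := beq_eq_false_iff_ne.mpr (Ne.symm h)
          simp [h, hkl]

-- per-record: A's enrichment body equals B's pvEnriched
theorem pv_record_eq (left_key right_key : String) (right_data : List (List (String × String))) (enrich_fields : List String) (l : List (String × String)) :
    (match (PySem.Dict.mk l).get? left_key with
      | some left_value =>
        match (right_data.foldl (fun (idx : PySem.Dict String (List (String × String))) (r : List (String × String)) =>
            match (PySem.Dict.mk r).get? right_key with
            | some kv => idx.insert kv r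
            | none => idx) PySem.Dict.empty).get? left_value with
        | some right_record =>
          if enrich_fields = [] then
            (PySem.Dict.mk right_record).items.foldl (fun (e : PySem.Dict String String) (kv : String × String) =>
              if kv.1 ≠ right_key then e.insert ("right_" ++ kv.1) kv.2 else e) (PySem.Dict.mk l)
          else
            enrich_fields.foldl (fun (e : PySem.Dict String String) (field : String) =>
              match (PySem.Dict.mk right_record).get? field with
              | some v => e.insert field v
              | none => e) (PySem.Dict.mk l)
        | none => PySem.Dict.mk l
      | none => PySem.Dict.mk l).items
    = pvEnriched left_key right_key right_data enrich_fields l := by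
  unfold pvEnriched pvMatchFor
  cases (PySem.Dict.mk l).get? left_key with
  | none => rfl
  | some lv =>
    simp only [pv_index_lookup, Option.bind_some]
    cases (right_data.reverse.find? (fun r => (PySem.Dict.mk r).get? right_key == some lv)) with
    | none => simp
    | some rr =>
      simp only [Option.some_or, Option.elim_some]
      by_cases he : enrich_fields = []
      · simp only [he, ne_eq, not_true_eq_false, if_false]
        show _ = (PySem.Dict.update _ _).items
        congr 1
        rw [PySem.Dict.update, List.foldl_map, List.foldl_filter]
        apply PySem.List.foldl_congr_mem; simp
      · simp only [if_neg he, if_pos he]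
        show _ = (PySem.Dict.update _ _).items
        congr 1
        rw [PySem.Dict.update, List.foldl_filterMap]
        apply PySem.List.foldl_congr_mem
        intro e f _
        cases (PySem.Dict.mk rr).get? f <;> rfl

-- ===== VERDICT (by name: the statement is the Claim_ definition above) =====
theorem enrich_merge_py_spec : Claim_equal_enrich_merge_py := by
  intro left_data right_data join_conditions enrich_fields _
  unfold Spec_enrich_merge_py enrich_merge_py enrich_merge_py_alt
  cases hL : (PySem.Dict.mk join_conditions).get? "left_key" with
  | none => simp
  | some left_key =>
    cases hR : (PySem.Dict.mk join_conditions).get? "right_key" with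
    | none => simp
    | some right_key =>
      simp only [Option.getD_some]
      by_cases hg : left_key = "" ∨ right_key = ""
      · simp [hg]
      · simp only [if_neg hg]
        rw [show (left_data.map (pvEnriched left_key right_key right_data enrich_fields)) = [] ++ left_data.map (pvEnriched left_key right_key right_data enrich_fields) from rfl,
            ← PySem.List.foldl_append_singleton_eq_map]
        apply PySem.List.foldl_congr_mem
        intro res l _
        rw [← pv_record_eq left_key right_key right_data enrich_fields l]
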